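-- pv_equiv track=rewrite | github.com/Zhiwx1526/Zotero-Tracker-New | src/zotero_tracker/retriever/openalex.py | _decode_inverted_index
-- ===== SOURCE A (Python) =====
-- def _decode_inverted_index(inverted_index: dict[str, list[int]] | None) -> str:
--     if not inverted_index:
--         return ""
--     tokens: list[tuple[int, str]] = []
--     for token, positions in inverted_index.items():
--         for position in positions:
--             tokens.append((position, token))
--     tokens.sort(key=lambda x: x[0])
--     return " ".join(token for _, token in tokens).strip()
-- ===== SOURCE B (Python) =====
-- def _decode_inverted_index(inverted_index):
--     if not inverted_index:
--         return ""
--     ordered = []  # kept sorted by position at all times; ties keep arrival order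
--     for token, positions in inverted_index.items():
--         for position in positions:
--             i = 0
--             while i < len(ordered) and ordered[i][0] <= position:
--                 i += 1
--             ordered.insert(i, (position, token))
--     return " ".join(token for _, token in ordered).strip()
-- ===== Notes on version B (the rewrite author's own statement) =====
-- stated objective: alternative
-- what changed: Instead of collecting all (position, token) pairs and batch-sorting them afterwards, B maintains a single always-sorted list and stably inserts each pair at its place as it streams the index (online insertion sort), so no sort call and no separate pair-collection pass exist.
import Mathlib
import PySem

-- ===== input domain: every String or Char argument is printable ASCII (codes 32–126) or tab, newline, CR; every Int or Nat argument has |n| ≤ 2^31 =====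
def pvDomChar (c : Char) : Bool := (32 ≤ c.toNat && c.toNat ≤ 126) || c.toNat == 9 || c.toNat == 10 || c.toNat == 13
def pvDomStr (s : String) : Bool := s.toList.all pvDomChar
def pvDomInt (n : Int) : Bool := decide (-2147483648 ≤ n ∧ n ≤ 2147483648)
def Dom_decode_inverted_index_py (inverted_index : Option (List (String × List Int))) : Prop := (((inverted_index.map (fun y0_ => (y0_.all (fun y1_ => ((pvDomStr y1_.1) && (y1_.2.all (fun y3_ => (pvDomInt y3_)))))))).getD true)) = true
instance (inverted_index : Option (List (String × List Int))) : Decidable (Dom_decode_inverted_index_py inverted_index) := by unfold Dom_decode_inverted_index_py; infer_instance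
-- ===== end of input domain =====

-- B replaces A's collect-then-sort by an online stable insertion sort: each (position, token)
-- pair is inserted into an always-sorted list as the index is streamed (no sort call; not faster).

-- ===== PORT A =====
def decode_inverted_index_py (inverted_index : Option (List (String × List Int))) : String :=
  match inverted_index with
  | none => ""
  | some items =>
    if items = [] then ""
    else
      -- tokens = []; for token, positions in …: for position in positions: tokens.append((position, token))
      let tokens : List (Int × String) :=
        items.foldl (fun acc it => it.2.foldl (fun acc p => acc ++ [(p, it.1)]) acc) []
      -- tokens.sort(key=lambda x: x[0])  (stable)
      let tokens := PySem.List.sorted tokens (fun x => x.1)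
      PySem.Str.strip (PySem.Str.join " " (tokens.map (fun t => t.2)))

-- ===== PORT B =====
-- the inner 'while i < len(ordered) and ordered[i][0] <= position: i += 1; ordered.insert(i, …)'
-- loop: walk past every entry whose position is ≤ the new one, insert there (stable)
def pvInsertOrdered (x : Int × String) : List (Int × String) → List (Int × String)
  | [] => [x]
  | y :: ys => if y.1 ≤ x.1 then y :: pvInsertOrdered x ys else x :: y :: ys

def decode_inverted_index_py_alt (inverted_index : Option (List (String × List Int))) : String :=
  match inverted_index with
  | none => ""
  | some items =>
    if items = [] then ""
    else
      -- ordered kept sorted; each pair inserted at its place as the index is streamed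
      let ordered : List (Int × String) :=
        items.foldl (fun acc it => it.2.foldl (fun acc p => pvInsertOrdered (p, it.1) acc) acc) []
      PySem.Str.strip (PySem.Str.join " " (ordered.map (fun t => t.2)))

-- ===== PRECONDITION & SPEC =====
def Spec_decode_inverted_index_py (inverted_index : Option (List (String × List Int))) (out : String) : Prop := out = decode_inverted_index_py_alt inverted_index
instance (inverted_index : Option (List (String × List Int))) (out : String) : Decidable (Spec_decode_inverted_index_py inverted_index out) := by unfold Spec_decode_inverted_index_py; infer_instance

-- ===== CLAIM =====
def Claim_equal_decode_inverted_index_py : Prop := ∀ (inverted_index : Option (List (String × List Int))), Dom_decode_inverted_index_py inverted_index → Spec_decode_inverted_index_py inverted_index (decode_inverted_index_py inverted_index)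

-- ===== LEMMAS AND PROOFS =====

-- B's insertion is exactly the stable insertion step of PySem's insertion-sort characterisation
lemma pvInsertOrdered_eq_insertBy (x : Int × String) (l : List (Int × String)) :
    pvInsertOrdered x l = PySem.List.insertBy (fun a b => decide (a.1 < b.1)) x l := by
  induction l with
  | nil => rfl
  | cons y ys ih =>
    show (if y.1 ≤ x.1 then _ else _) = (if decide (x.1 < y.1) = true then _ else _)
    by_cases h : y.1 ≤ x.1
    · rw [if_pos h, if_neg (by simpa using not_lt.mpr h), ih]
    · rw [if_neg h, if_pos (by simpa using lt_of_not_ge h)]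

-- A's nested append loop builds exactly the pair stream
lemma tokensA_eq (items : List (String × List Int)) :
    items.foldl (fun acc it => it.2.foldl (fun acc p => acc ++ [(p, it.1)]) acc) []
      = items.flatMap (fun it => it.2.map (fun p => (p, it.1))) := by
  have h : ∀ (acc : List (Int × String)),
      items.foldl (fun acc it => it.2.foldl (fun acc p => acc ++ [(p, it.1)]) acc) acc
        = acc ++ items.flatMap (fun it => it.2.map (fun p => (p, it.1))) := by
    induction items with
    | nil => simp
    | cons it items ih =>
      intro acc
      simp only [List.foldl_cons, List.flatMap_cons]
      rw [PySem.List.foldl_append_singleton_eq_map, ih]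
      simp
  simpa using h []

-- B's nested insertion loop is the insertion fold over the same pair stream
lemma orderedB_eq (items : List (String × List Int)) (acc : List (Int × String)) :
    items.foldl (fun acc it => it.2.foldl (fun acc p => pvInsertOrdered (p, it.1) acc) acc) acc
      = (items.flatMap (fun it => it.2.map (fun p => (p, it.1)))).foldl
          (fun acc q => pvInsertOrdered q acc) acc := by
  induction items generalizing acc with
  | nil => rfl
  | cons it items ih =>
    simp only [List.foldl_cons, List.flatMap_cons, List.foldl_append]
    rw [ih, List.foldl_map]

-- the two insertion folds agree step by step
lemma pvFoldlInsert_eq (ts : List (Int × String)) (acc : List (Int × String)) :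
    ts.foldl (fun acc q => pvInsertOrdered q acc) acc
      = ts.foldl (fun acc x => PySem.List.insertBy (fun a b => decide (a.1 < b.1)) x acc) acc := by
  simp only [pvInsertOrdered_eq_insertBy]

set_option maxHeartbeats 1000000 in
theorem decode_inverted_index_py_spec_aux (items : List (String × List Int)) :
    decode_inverted_index_py (some items) = decode_inverted_index_py_alt (some items) := by
  show (if items = [] then "" else _) = (if items = [] then "" else _)
  by_cases hnil : items = []
  · simp [hnil]
  rw [if_neg hnil, if_neg hnil]
  rw [tokensA_eq, orderedB_eq]
  generalize items.flatMap (fun it => it.2.map (fun p => (p, it.1))) = ts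
  rw [PySem.List.sorted_eq_foldl_insertBy]
  rw [pvFoldlInsert_eq]

-- ===== VERDICT =====
theorem decode_inverted_index_py_spec : Claim_equal_decode_inverted_index_py := by
  intro ii _
  show decode_inverted_index_py ii = decode_inverted_index_py_alt ii
  cases ii with
  | none => rfl
  | some items => exact decode_inverted_index_py_spec_aux items
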